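-- pv_equiv track=rewrite | github.com/Y4tacker/Web-Security | CommonlyUsedScripts/Python无数字shell/source.py | getNumber3
-- ===== SOURCE A (Python) =====
-- def getNumber3(number):
--     number = int(number)
--     if number in [-2, -1, 0, 1]:
--         return ["~int(True)", "~int(False)",
--                 "int(False)", "int(True)"][number + 2]
--
--     if number % 2:
--         return "~%s" % getNumber3(~number)
--     else:
--         return "(%s<<(int(True)))" % getNumber3(number / 2)
-- ===== SOURCE B (Python) =====
-- def getNumber3(number):
--     number = int(number)
--     base = ["~int(True)", "~int(False)", "int(False)", "int(True)"]
--     prefix = ""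
--     suffix = ""
--     while number not in (-2, -1, 0, 1):
--         if number % 2:
--             prefix += "~"
--             number = ~number
--         else:
--             prefix += "("
--             suffix = "<<(int(True)))" + suffix
--             number = int(number / 2)
--     return prefix + base[number + 2] + suffix
-- ===== Notes on version B (the rewrite author's own statement) =====
-- stated objective: alternative
-- what changed: Replaces A's self-embedding recursion (each call wraps the recursive result in a format string) by a single iterative while-loop that threads the number together with two accumulator strings, appending to a prefix and prepending to a suffix, then splices the base-table entry between them.
import Mathlib
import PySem

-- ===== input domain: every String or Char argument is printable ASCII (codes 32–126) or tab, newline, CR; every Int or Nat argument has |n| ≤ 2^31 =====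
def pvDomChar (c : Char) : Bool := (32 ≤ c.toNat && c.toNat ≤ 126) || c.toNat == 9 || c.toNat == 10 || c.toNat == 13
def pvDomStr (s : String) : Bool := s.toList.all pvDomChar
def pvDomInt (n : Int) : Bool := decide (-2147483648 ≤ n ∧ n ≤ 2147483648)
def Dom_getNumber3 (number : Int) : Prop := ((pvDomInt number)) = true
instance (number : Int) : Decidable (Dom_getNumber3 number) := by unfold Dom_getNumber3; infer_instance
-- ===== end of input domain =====

-- B replaces A's self-embedding recursion by a single iterative loop with two accumulator
-- strings (prefix/suffix); equal return values on every Int (objective: alternative decomposition).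
-- Both ports carry a fuel counter as a totality guard only; 2*|n|+4 steps always suffice
-- (proved in pvFuel_enough below), so the fuel-exhausted "" branch is never reached.

-- ===== PORT A =====
-- Literal transliteration of A. Notes on exactness: Python's truthiness test 'number % 2' is
-- 'mod number 2 ≠ 0'; '~number' is '-number - 1'; 'int(number / 2)' is reached only when
-- number is even, where float true division is exact and equals 'number / 2' on Int.
def getNumber3Go (fuel : Nat) (number : Int) : String :=
  match fuel with
  | 0 => ""  -- never reached: fuel is sufficient at the top-level call
  | fuel + 1 =>
    if number ∈ ([-2, -1, 0, 1] : List Int) then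
      (PySem.List.pyGet? ["~int(True)", "~int(False)", "int(False)", "int(True)"] (number + 2)).getD ""
    else if PySem.Int.mod number 2 ≠ 0 then
      "~" ++ getNumber3Go fuel (-number - 1)
    else
      "(" ++ getNumber3Go fuel (number / 2) ++ "<<(int(True)))"

def getNumber3 (number : Int) : String := getNumber3Go (2 * number.natAbs + 4) number

-- ===== PORT B =====
-- The while-loop of Source B: 'number' and the two accumulators 'prefix'/'suffix' are the state.
def pvLoop (fuel : Nat) (n : Int) (pre suf : String) : String :=
  match fuel with
  | 0 => ""  -- never reached: fuel is sufficient at the top-level call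
  | fuel + 1 =>
    if n = -2 ∨ n = -1 ∨ n = 0 ∨ n = 1 then
      pre ++ (PySem.List.pyGet? ["~int(True)", "~int(False)", "int(False)", "int(True)"] (n + 2)).getD "" ++ suf
    else if PySem.Int.mod n 2 ≠ 0 then
      pvLoop fuel (-n - 1) (pre ++ "~") suf
    else
      pvLoop fuel (n / 2) (pre ++ "(") ("<<(int(True)))" ++ suf)

def getNumber3_alt (number : Int) : String := pvLoop (2 * number.natAbs + 4) number "" ""

-- ===== PRECONDITION & SPEC =====
def Spec_getNumber3 (number : Int) (out : String) : Prop := out = getNumber3_alt number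
instance (number : Int) (out : String) : Decidable (Spec_getNumber3 number out) := by unfold Spec_getNumber3; infer_instance

-- ===== CLAIM (what is proved, stated in full; the proofs are below) =====
def Claim_equal_getNumber3 : Prop := ∀ (number : Int), Dom_getNumber3 number → Spec_getNumber3 number (getNumber3 number)

-- ===== LEMMAS AND PROOFS =====

-- Step measure: |n| (shifted for nonnegatives) with a parity tiebreak; an odd step keeps the
-- first component and drops the parity bit, an even step halves it.
def pvMu (n : Int) : Nat := 2 * (if 0 ≤ n then n + 1 else -n).toNat + (n % 2).toNat

theorem pvMu_odd {n : Int} (ho : n % 2 ≠ 0) : pvMu (-n - 1) < pvMu n := by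
  unfold pvMu; split_ifs <;> omega

theorem pvMu_even {n : Int} (h : ¬(n = -2 ∨ n = -1 ∨ n = 0 ∨ n = 1)) (he : n % 2 = 0) :
    pvMu (n / 2) < pvMu n := by
  unfold pvMu; split_ifs <;> omega

theorem pvMod_ne {n : Int} : PySem.Int.mod n 2 ≠ 0 ↔ n % 2 ≠ 0 := by
  rw [PySem.Int.mod_eq_emod_of_pos (by norm_num : (0:Int) < 2)]

-- Loop invariant: with sufficient fuel, the loop result is the accumulated prefix,
-- A's recursive value, and the suffix.
theorem pvLoop_eq (fuel : Nat) (n : Int) (pre suf : String) (hf : pvMu n < fuel) :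
    pvLoop fuel n pre suf = pre ++ getNumber3Go fuel n ++ suf := by
  induction fuel generalizing n pre suf with
  | zero => omega
  | succ fuel ih =>
    by_cases hb : n = -2 ∨ n = -1 ∨ n = 0 ∨ n = 1
    · have hm : n ∈ ([-2, -1, 0, 1] : List Int) := by simpa using hb
      rw [pvLoop, if_pos hb, getNumber3Go, if_pos hm]
    · have hm : ¬ n ∈ ([-2, -1, 0, 1] : List Int) := by simpa using hb
      by_cases ho : PySem.Int.mod n 2 ≠ 0
      · have hlt : pvMu (-n - 1) < fuel :=
          lt_of_lt_of_le (pvMu_odd (pvMod_ne.mp ho)) (by omega)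
        rw [pvLoop, if_neg hb, if_pos ho, ih _ _ _ hlt]
        conv_rhs => rw [getNumber3Go, if_neg hm, if_pos ho]
        simp [String.append_assoc]
      · have hlt : pvMu (n / 2) < fuel :=
          lt_of_lt_of_le (pvMu_even hb (not_not.mp ((not_iff_not.mpr pvMod_ne).mp ho))) (by omega)
        rw [pvLoop, if_neg hb, if_neg ho, ih _ _ _ hlt]
        conv_rhs => rw [getNumber3Go, if_neg hm, if_neg ho]
        simp [String.append_assoc]

theorem pvFuel_enough (n : Int) : pvMu n < 2 * n.natAbs + 4 := by
  unfold pvMu; split_ifs <;> omega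

-- ===== VERDICT (by name: the statement is the Claim_ definition above) =====
theorem getNumber3_spec : Claim_equal_getNumber3 := by
  intro n _
  unfold Spec_getNumber3 getNumber3_alt getNumber3
  rw [pvLoop_eq _ _ _ _ (pvFuel_enough n)]
  simp
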